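-- pv_equiv track=rewrite | github.com/macaon/cellar | cellar/backend/dosbox.py | _strip_autoexec
-- ===== SOURCE A (Python) =====
-- def _strip_autoexec(text: str) -> str:
--     """Remove the ``[autoexec]`` section from config text for configparser."""
--     result: list[str] = []
--     in_autoexec = False
--
--     for line in text.splitlines():
--         stripped = line.strip().lower()
--         if stripped == "[autoexec]":
--             in_autoexec = True
--             continue
--         if in_autoexec:
--             if stripped.startswith("[") and stripped.endswith("]"):
--                 in_autoexec = False
--                 result.append(line)
--             continue
--         result.append(line)
--
--     return "\n".join(result)
-- ===== SOURCE B (Python) =====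
-- def _strip_autoexec(text: str) -> str:
--     """Remove the ``[autoexec]`` section from config text for configparser."""
--     lines = text.splitlines()
--     # pass 1: label every line with the section header that governs it
--     # (a header line is governed by itself; "" = before any header)
--     labels = []
--     current = ""
--     for line in lines:
--         s = line.strip().lower()
--         if s.startswith("[") and s.endswith("]"):
--             current = s
--         labels.append(current)
--     # pass 2: keep exactly the lines not governed by [autoexec]
--     return "\n".join(line for line, sec in zip(lines, labels) if sec != "[autoexec]")
-- ===== Notes on version B (the rewrite author's own statement) =====
-- stated objective: alternative
-- what changed: Replaces A's single-pass boolean state machine with two staged passes: a scan that labels every line with its governing section header, then a declarative filter keeping the lines whose label is not [autoexec].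
import Mathlib
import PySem

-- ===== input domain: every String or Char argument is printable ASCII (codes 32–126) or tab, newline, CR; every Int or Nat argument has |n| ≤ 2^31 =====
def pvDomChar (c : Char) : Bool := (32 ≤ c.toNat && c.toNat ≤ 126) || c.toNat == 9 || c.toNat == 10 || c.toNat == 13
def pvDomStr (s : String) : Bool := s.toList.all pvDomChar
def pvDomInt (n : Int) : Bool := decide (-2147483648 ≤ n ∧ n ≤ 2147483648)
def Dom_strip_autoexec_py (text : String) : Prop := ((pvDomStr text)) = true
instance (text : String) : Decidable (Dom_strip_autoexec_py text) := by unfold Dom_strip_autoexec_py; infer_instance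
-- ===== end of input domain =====

-- B replaces A's one-pass boolean state machine by two staged passes: label every line
-- with its governing section header, then filter by label ≠ "[autoexec]" (same cost).

-- ===== PORT A =====
-- A's for-loop over splitlines with accumulator `result` and flag `in_autoexec`.
def stripA_loop : List String → List String → Bool → List String
  | [], res, _ => res
  | line :: rest, res, inA =>
    let stripped := PySem.Str.lower (PySem.Str.strip line)
    if stripped == "[autoexec]" then stripA_loop rest res true
    else if inA then
      if PySem.Str.startswith stripped "[" && PySem.Str.endswith stripped "]" then
        stripA_loop rest (res ++ [line]) false
      else stripA_loop rest res inA
    else stripA_loop rest (res ++ [line]) inA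

def strip_autoexec_py (text : String) : String :=
  PySem.Str.join "\n" (stripA_loop (PySem.Str.splitlines text) [] false)

-- ===== PORT B =====
-- pass 1: the governing section header of each line ("" before any header)
def stripB_labels : List String → String → List String
  | [], _ => []
  | line :: rest, current =>
    let s := PySem.Str.lower (PySem.Str.strip line)
    let current' :=
      if PySem.Str.startswith s "[" && PySem.Str.endswith s "]" then s else current
    current' :: stripB_labels rest current'

-- pass 2: keep exactly the lines not governed by "[autoexec]", then join
def strip_autoexec_py_alt (text : String) : String :=
  let lines := PySem.Str.splitlines text
  PySem.Str.join "\n"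
    (((lines.zip (stripB_labels lines "")).filter (fun p => p.2 ≠ "[autoexec]")).map Prod.fst)

-- ===== PRECONDITION & SPEC =====
def Spec_strip_autoexec_py (text : String) (out : String) : Prop := out = strip_autoexec_py_alt text
instance (text : String) (out : String) : Decidable (Spec_strip_autoexec_py text out) := by unfold Spec_strip_autoexec_py; infer_instance

-- ===== CLAIM (what is proved, stated in full; the proofs are below) =====
def Claim_equal_strip_autoexec_py : Prop := ∀ (text : String), Dom_strip_autoexec_py text → Spec_strip_autoexec_py text (strip_autoexec_py text)

-- ===== LEMMAS AND PROOFS =====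
-- Invariant: A's flag loop equals the accumulator prefix plus B's label-and-filter of the
-- remaining lines, whenever the flag agrees with "current label is [autoexec]".
theorem stripA_eq_filter (lines : List String) : ∀ (res : List String) (cur : String)
    (inA : Bool), (cur = "[autoexec]" ↔ inA = true) →
    stripA_loop lines res inA =
      res ++ ((lines.zip (stripB_labels lines cur)).filter
        (fun p => p.2 ≠ "[autoexec]")).map Prod.fst := by
  induction lines with
  | nil => intro res cur inA _; simp [stripA_loop, stripB_labels]
  | cons line rest ih =>
    intro res cur inA hflag
    by_cases h : PySem.Str.lower (PySem.Str.strip line) = "[autoexec]"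
    · have hb : (PySem.Str.startswith (PySem.Str.lower (PySem.Str.strip line)) "["
          && PySem.Str.endswith (PySem.Str.lower (PySem.Str.strip line)) "]") = true := by
        rw [h]; decide
      have hA : stripA_loop (line :: rest) res inA = stripA_loop rest res true := by
        simp [stripA_loop, h]
      have hL : stripB_labels (line :: rest) cur =
          PySem.Str.lower (PySem.Str.strip line)
            :: stripB_labels rest (PySem.Str.lower (PySem.Str.strip line)) := by
        simp only [stripB_labels]; rw [if_pos hb]
      rw [hA, hL, h, ih res "[autoexec]" true (by simp)]
      simp
    · by_cases hb : (PySem.Str.startswith (PySem.Str.lower (PySem.Str.strip line)) "["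
          && PySem.Str.endswith (PySem.Str.lower (PySem.Str.strip line)) "]") = true
      · -- a header other than [autoexec]: kept by both, new state "outside autoexec"
        obtain ⟨hb1, hb2⟩ :
            PySem.Chars.startswith (PySem.Chars.lower (PySem.Chars.strip line.toList)) ('[' :: []) = true
          ∧ PySem.Chars.endswith (PySem.Chars.lower (PySem.Chars.strip line.toList)) (']' :: []) = true := by
          simpa [Bool.and_eq_true] using hb
        have hA : stripA_loop (line :: rest) res inA = stripA_loop rest (res ++ [line]) false := by
          cases inA <;> simp [stripA_loop, h, hb1, hb2]
        have hL : stripB_labels (line :: rest) cur =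
            PySem.Str.lower (PySem.Str.strip line)
              :: stripB_labels rest (PySem.Str.lower (PySem.Str.strip line)) := by
          simp only [stripB_labels]; rw [if_pos hb]
        rw [hA, hL, ih (res ++ [line]) (PySem.Str.lower (PySem.Str.strip line)) false
          (by simp [h])]
        simp [h]
      · -- an ordinary line: kept iff not in the autoexec section
        have hL : stripB_labels (line :: rest) cur = cur :: stripB_labels rest cur := by
          simp only [stripB_labels]; rw [if_neg hb]
        cases inA with
        | false =>
          have hcur : ¬ cur = "[autoexec]" := fun hc => by simpa using hflag.mp hc
          have hA : stripA_loop (line :: rest) res false = stripA_loop rest (res ++ [line]) false := by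
            simp [stripA_loop, h]
          rw [hA, hL, ih (res ++ [line]) cur false hflag]
          simp [hcur]
        | true =>
          have hcur : cur = "[autoexec]" := hflag.mpr rfl
          have hb' : PySem.Chars.startswith (PySem.Chars.lower (PySem.Chars.strip line.toList)) ('[' :: []) = true →
              PySem.Chars.endswith (PySem.Chars.lower (PySem.Chars.strip line.toList)) (']' :: []) = false := by
            simpa using hb
          have hA : stripA_loop (line :: rest) res true = stripA_loop rest res true := by
            simp only [stripA_loop]
            simp [h]
            intro h1 h2
            exact absurd (hb' h1) (by simp [h2])
          rw [hA, hL, ih res cur true hflag, hcur]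
          simp

-- ===== VERDICT (by name: the statement is the Claim_ definition above) =====
theorem strip_autoexec_py_spec : Claim_equal_strip_autoexec_py := by
  intro text _
  unfold Spec_strip_autoexec_py strip_autoexec_py strip_autoexec_py_alt
  rw [stripA_eq_filter _ [] "" false (by simp), List.nil_append]
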